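-- pv_equiv track=rewrite | github.com/lalakate/5th-semester | ОКС/lab2/ports.py | getStuffedBits
-- ===== SOURCE A (Python) =====
-- SEARCH_BITS = "1000111"
--
-- SEARCH_LEN = len(SEARCH_BITS)
--
-- def getStuffedBits(packet):
--     left = ""
--     stuffedBits = "0" * 8
--     for bit in packet[8:]:
--         left += bit
--         if left[:-1] == SEARCH_BITS:
--             stuffedBits += "0" * SEARCH_LEN + "1"
--             left = ""
--         if len(left) == SEARCH_LEN + 1:
--             stuffedBits += "0"
--             left = left[1:]
--     if left != "":
--         stuffedBits += "0" * len(left)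
--     return stuffedBits
-- ===== SOURCE B (Python) =====
-- SEARCH_BITS = "1000111"
--
-- SEARCH_LEN = len(SEARCH_BITS)
--
-- def getStuffedBits(packet):
--     # skip between matches with str.find instead of streaming a bit buffer
--     r = packet[8:]
--     parts = ["0" * 8]
--     p = 0
--     while True:
--         i = r.find(SEARCH_BITS, p)
--         if i == -1 or i + SEARCH_LEN + 1 > len(r):
--             break
--         parts.append("0" * (i - p + SEARCH_LEN) + "1")
--         p = i + SEARCH_LEN + 1
--     parts.append("0" * (len(r) - p))
--     return "".join(parts)
-- ===== Notes on version B (the rewrite author's own statement) =====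
-- stated objective: faster
-- what changed: B drops A's streaming one-character buffer and per-character loop entirely: it jumps through the payload with str.find, emitting a zero run up to each pattern occurrence that is followed by at least one more bit, then the stuffed block, then one zero run for the tail.
import Mathlib
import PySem

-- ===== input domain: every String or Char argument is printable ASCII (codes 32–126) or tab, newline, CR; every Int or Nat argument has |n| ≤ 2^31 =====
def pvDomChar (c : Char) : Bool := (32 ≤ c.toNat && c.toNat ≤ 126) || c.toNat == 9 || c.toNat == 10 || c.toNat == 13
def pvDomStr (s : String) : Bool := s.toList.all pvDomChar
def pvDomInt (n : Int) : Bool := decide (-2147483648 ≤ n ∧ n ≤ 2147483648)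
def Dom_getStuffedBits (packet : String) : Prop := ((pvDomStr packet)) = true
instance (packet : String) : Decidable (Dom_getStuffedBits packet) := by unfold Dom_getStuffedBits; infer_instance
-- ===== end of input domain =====

-- B replaces A's streaming one-char buffer with str.find jumps between pattern matches (objective: alternative decomposition).

-- module constant SEARCH_BITS = "1000111", SEARCH_LEN = len(SEARCH_BITS) = 7
def pvSearchBits : List Char := ['1', '0', '0', '0', '1', '1', '1']

def pvSearchLen : Nat := pvSearchBits.length

-- ===== PORT A =====
-- one iteration of A's for-loop body; state = (left, stuffedBits)
def getStuffedBitsStep (st : List Char × List Char) (bit : Char) : List Char × List Char :=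
  let left := st.1 ++ [bit]
  let st1 :=
    if PySem.List.slice left none (some (-1)) = pvSearchBits then
      (([] : List Char), st.2 ++ (List.replicate pvSearchLen '0' ++ ['1']))
    else (left, st.2)
  if st1.1.length = pvSearchLen + 1 then
    (PySem.List.slice st1.1 (some 1) none, st1.2 ++ ['0'])
  else st1

def getStuffedBits (packet : String) : String :=
  let st := (PySem.List.slice packet.toList (some 8) none).foldl getStuffedBitsStep
              ([], List.replicate 8 '0')
  String.mk (if st.1 ≠ [] then st.2 ++ List.replicate st.1.length '0' else st.2)

-- ===== PORT B =====
-- termination helper for the while-loop port: find with a start past the end yields -1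
theorem pvFindFrom_past_len (r sub : List Char) (p : Nat) (h : r.length < p) :
    PySem.Chars.findFrom r sub (p : Int) none = -1 := by
  simp only [PySem.Chars.findFrom]
  have h1 : ¬ ((p : Int) < 0) := by omega
  have h2 : ((r.length : Int) < (p : Int)) := by exact_mod_cast h
  simp [h1, h2]

-- Source B's while loop: p is the scan position, each iteration emits one `parts` element
def getStuffedBitsLoop (r : List Char) (p : Nat) : List Char :=
  let i := PySem.Chars.findFrom r pvSearchBits (p : Int) none
  if i = -1 ∨ ((r.length : Int) < i + (pvSearchLen : Int) + 1) then
    List.replicate (r.length - p) '0'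
  else
    (List.replicate (i.toNat - p + pvSearchLen) '0' ++ ['1']) ++
      getStuffedBitsLoop r (i.toNat + pvSearchLen + 1)
termination_by r.length - p
decreasing_by
  rename_i hcond
  rw [not_or, not_lt] at hcond
  obtain ⟨hne, hlen⟩ := hcond
  simp only [show pvSearchLen = 7 from rfl] at hlen ⊢
  by_cases hp : p ≤ r.length
  · have h1 := (PySem.Chars.findFrom_natCast_spec r pvSearchBits p hp hne).1
    omega
  · exact absurd (pvFindFrom_past_len r pvSearchBits p (by omega)) hne

def getStuffedBits_alt (packet : String) : String :=
  let r := PySem.List.slice packet.toList (some 8) none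
  String.mk (List.replicate 8 '0' ++ getStuffedBitsLoop r 0)

-- ===== PRECONDITION & SPEC =====
def Spec_getStuffedBits (packet : String) (out : String) : Prop := out = getStuffedBits_alt packet
instance (packet : String) (out : String) : Decidable (Spec_getStuffedBits packet out) := by unfold Spec_getStuffedBits; infer_instance

-- ===== CLAIM (what is proved, stated in full; the proofs are below) =====
def Claim_equal_getStuffedBits : Prop := ∀ (packet : String), Dom_getStuffedBits packet → Spec_getStuffedBits packet (getStuffedBits packet)

-- ===== LEMMAS AND PROOFS =====

theorem pvSL : pvSearchLen = 7 := rfl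

theorem pvSBlen : pvSearchBits.length = 7 := rfl

-- reference recursion: window of 8 at the front; match consumes 8 emitting "0"*7+"1", else consume 1 emitting "0"
def pvRef (r : List Char) : List Char :=
  if 8 ≤ r.length then
    if r.take 7 = pvSearchBits then
      List.replicate 7 '0' ++ '1' :: pvRef (r.drop 8)
    else
      '0' :: pvRef (r.drop 1)
  else List.replicate r.length '0'
termination_by r.length
decreasing_by all_goals simp; omega

-- the three shapes one loop iteration of A can take
theorem pvStep_match (left acc : List Char) (c : Char) (hm : left = pvSearchBits) :
    getStuffedBitsStep (left, acc) c = ([], acc ++ (List.replicate 7 '0' ++ ['1'])) := by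
  subst hm
  simp [getStuffedBitsStep, PySem.List.slice_to_neg_one, pvSL]

theorem pvStep_full (left acc : List Char) (c : Char) (hm : left ≠ pvSearchBits)
    (hl : left.length = 7) :
    getStuffedBitsStep (left, acc) c = ((left ++ [c]).tail, acc ++ ['0']) := by
  simp [getStuffedBitsStep, PySem.List.slice_to_neg_one, PySem.List.slice_from_one, hm, pvSL, hl]

theorem pvStep_small (left acc : List Char) (c : Char) (hl : left.length < 7) :
    getStuffedBitsStep (left, acc) c = (left ++ [c], acc) := by
  have hm : left ≠ pvSearchBits := by
    intro h; rw [h] at hl; simp [pvSearchBits] at hl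
  simp [getStuffedBitsStep, PySem.List.slice_to_neg_one, hm, pvSL]
  omega

theorem pvA_loop (cs : List Char) : ∀ (left acc : List Char), left.length ≤ 7 →
    (cs.foldl getStuffedBitsStep (left, acc)).2 ++
      List.replicate (cs.foldl getStuffedBitsStep (left, acc)).1.length '0'
      = acc ++ pvRef (left ++ cs) := by
  induction cs with
  | nil =>
    intro left acc hl
    simp only [List.foldl_nil]
    rw [pvRef]
    simp only [List.append_nil]
    rw [if_neg (by omega)]
  | cons c cs ih =>
    intro left acc hl
    simp only [List.foldl_cons]
    by_cases hm : left = pvSearchBits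
    · -- match: left has 7 chars equal to the pattern, the 8-window is full
      have hll : left.length = 7 := by rw [hm]; rfl
      rw [pvStep_match left acc c hm]
      conv_rhs => rw [pvRef]
      rw [if_pos (show 8 ≤ (left ++ c :: cs).length from by simp [hll]; omega)]
      rw [if_pos (by rw [List.take_left' hll]; exact hm)]
      have hdrop : (left ++ c :: cs).drop 8 = cs := by
        rw [show left ++ c :: cs = (left ++ [c]) ++ cs from by simp]
        exact List.drop_left' (by simp [hll])
      rw [hdrop]
      rw [ih [] _ (by simp)]
      simp
    · by_cases h7 : left.length = 7
      · -- window full, no match: shift one char out, emit "0"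
        have hlne : left ≠ [] := by intro h; simp [h] at h7
        rw [pvStep_full left acc c hm h7]
        conv_rhs => rw [pvRef]
        rw [if_pos (show 8 ≤ (left ++ c :: cs).length from by simp [h7]; omega)]
        rw [if_neg (by rw [List.take_left' h7]; exact hm)]
        have hdrop : (left ++ c :: cs).drop 1 = left.tail ++ c :: cs := by
          cases left with
          | nil => exact absurd rfl hlne
          | cons a l => simp
        rw [hdrop]
        rw [ih ((left ++ [c]).tail) _ (by simp [List.length_tail]; omega)]
        have htl : (left ++ [c]).tail ++ cs = left.tail ++ c :: cs := by
          cases left with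
          | nil => exact absurd rfl hlne
          | cons a l => simp
        rw [htl]
        simp
      · -- window not yet full: just accumulate
        rw [pvStep_small left acc c (by omega)]
        rw [ih _ _ (by simp; omega)]
        simp

-- if no occurrence of the pattern fits together with one extra char, the result is all zeros
theorem pvRef_no_valid : ∀ (n : Nat) (s : List Char), s.length = n →
    (∀ j, pvSearchBits <+: s.drop j → s.length < j + 8) →
    pvRef s = List.replicate s.length '0' := by
  intro n
  induction n using Nat.strong_induction_on with
  | _ n ih =>
    intro s hn h
    rw [pvRef]
    by_cases h8 : 8 ≤ s.length
    · rw [if_pos h8]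
      have hnm : s.take 7 ≠ pvSearchBits := by
        intro hp
        have hpre : pvSearchBits <+: s.drop 0 := by
          rw [List.drop_zero, ← hp]; exact List.take_prefix _ _
        have := h 0 hpre
        omega
      rw [if_neg hnm]
      rw [ih (n - 1) (by omega) (s.drop 1) (by simp; omega)
        (by
          intro j hj
          rw [List.drop_drop] at hj
          have := h (1 + j) (by simpa using hj)
          simp only [List.length_drop]
          omega)]
      simp only [List.length_drop]
      conv_rhs => rw [show s.length = (s.length - 1) + 1 from by omega, List.replicate_succ]
    · rw [if_neg h8]

-- first valid occurrence at k: zeros up to the match, the stuffed "1", then recurse past it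
theorem pvRef_first : ∀ (k : Nat) (s : List Char),
    pvSearchBits <+: s.drop k → (∀ j < k, ¬ pvSearchBits <+: s.drop j) → k + 8 ≤ s.length →
    pvRef s = List.replicate (k + 7) '0' ++ '1' :: pvRef (s.drop (k + 8)) := by
  intro k
  induction k with
  | zero =>
    intro s hk _ hlen
    rw [pvRef]
    rw [if_pos (by omega)]
    rw [List.drop_zero] at hk
    rw [if_pos (by
      have h := List.prefix_iff_eq_take.mp hk
      rw [← pvSBlen]
      exact h.symm)]
  | succ k ih =>
    intro s hk hmin hlen
    rw [pvRef]
    rw [if_pos (by omega)]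
    rw [if_neg (by
      intro hp
      exact hmin 0 (by omega) (by rw [List.drop_zero, ← hp]; exact List.take_prefix _ _))]
    rw [ih (s.drop 1) (by rw [List.drop_drop]; rwa [show 1 + k = k + 1 from by omega])
      (by
        intro j hj
        rw [List.drop_drop]
        rw [show 1 + j = j + 1 from by omega]
        exact hmin (j + 1) (by omega))
      (by simp; omega)]
    rw [List.drop_drop]
    rw [show 1 + (k + 8) = (k + 1) + 8 from by omega]
    conv_rhs => rw [show k + 1 + 7 = (k + 7) + 1 from by omega, List.replicate_succ]
    rw [List.cons_append]

theorem pvB_loop : ∀ (m : Nat) (r : List Char) (p : Nat), r.length - p = m → p ≤ r.length →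
    getStuffedBitsLoop r p = pvRef (r.drop p) := by
  intro m
  induction m using Nat.strong_induction_on with
  | _ m ih =>
    intro r p hm hp
    rw [getStuffedBitsLoop]
    by_cases hc : PySem.Chars.findFrom r pvSearchBits (p : Int) none = -1 ∨
        ((r.length : Int) < PySem.Chars.findFrom r pvSearchBits (p : Int) none + (pvSearchLen : Int) + 1)
    · rw [if_pos hc]
      rw [pvRef_no_valid (r.drop p).length _ rfl ?_]
      · simp
      · intro j hj
        by_cases hneg : PySem.Chars.findFrom r pvSearchBits (p : Int) none = -1
        · exfalso
          rw [PySem.Chars.findFrom_natCast_eq_neg_one_iff r pvSearchBits p hp] at hneg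
          exact hneg (hj.isInfix.trans (List.drop_suffix j _).isInfix)
        · have hlen' : (r.length : Int) <
              PySem.Chars.findFrom r pvSearchBits (p : Int) none + 7 + 1 := by
            rcases hc with hc | hc
            · exact absurd hc hneg
            · rwa [pvSL] at hc
          have hspec := PySem.Chars.findFrom_natCast_spec r pvSearchBits p hp hneg
          rw [List.drop_drop] at hj
          by_cases hji : p + j < (PySem.Chars.findFrom r pvSearchBits (p : Int) none).toNat
          · exact absurd hj (hspec.2.2 (p + j) (by omega) hji)
          · have h1 := hspec.1
            simp only [List.length_drop]
            omega
    · rw [if_neg hc]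
      rw [not_or, not_lt] at hc
      obtain ⟨hne, hlen⟩ := hc
      have hspec := PySem.Chars.findFrom_natCast_spec r pvSearchBits p hp hne
      have h1 := hspec.1
      rw [pvSL] at hlen ⊢
      set i := PySem.Chars.findFrom r pvSearchBits (p : Int) none with hi
      have hip : p ≤ i.toNat := by omega
      have hil : i.toNat + 8 ≤ r.length := by omega
      -- rewrite the recursive call, then apply pvRef_first on s = r.drop p with k = i.toNat - p
      rw [ih (r.length - (i.toNat + 7 + 1)) (by omega) r _ rfl (by omega)]
      rw [pvRef_first (i.toNat - p) (r.drop p)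
        (by
          rw [List.drop_drop]
          rw [show p + (i.toNat - p) = i.toNat from by omega]
          exact hspec.2.1)
        (by
          intro j hj hpre
          rw [List.drop_drop] at hpre
          exact hspec.2.2 (p + j) (by omega) (by omega) hpre)
        (by simp only [List.length_drop]; omega)]
      rw [List.drop_drop]
      rw [show p + (i.toNat - p + 8) = i.toNat + 7 + 1 from by omega]
      simp

-- ===== VERDICT (by name: the statement is the Claim_ definition above) =====
theorem getStuffedBits_spec : Claim_equal_getStuffedBits := by
  unfold Claim_equal_getStuffedBits
  intro packet _
  unfold Spec_getStuffedBits getStuffedBits getStuffedBits_alt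
  simp only []
  set r := PySem.List.slice packet.toList (some 8) none with hr
  have hA := pvA_loop r [] (List.replicate 8 '0') (by simp)
  set st := r.foldl getStuffedBitsStep ([], List.replicate 8 '0') with hst
  have hB := pvB_loop r.length r 0 (by omega) (by omega)
  rw [List.drop_zero] at hB
  rw [hB]
  simp only [List.nil_append] at hA
  by_cases h1 : st.1 = []
  · rw [if_neg (by simpa using h1)]
    rw [← hA, h1]
    simp
  · rw [if_pos (by simpa using h1), hA]
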